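-- pv_equiv track=rewrite | github.com/riccotti/InterpretableModels | code/models.py | get_balancing
-- ===== SOURCE A (Python) =====
-- def get_balancing(node_id, children_left, children_right, is_leaves):
--     if is_leaves[node_id]:
--         return 0
--     hl = 0
--     hr = 0
--     if children_left[node_id] >= 0:
--         hl = get_balancing(children_left[node_id], children_left, children_right, is_leaves)
--     if children_right[node_id] >= 0:
--         hr = get_balancing(children_right[node_id], children_left, children_right, is_leaves)
--     h = max(hr, hl) + 1
--     if node_id != 0:
--         return h
--     else:
--         return hr - hl
-- ===== SOURCE B (Python) =====
-- def get_balancing(node_id, children_left, children_right, is_leaves):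
--     if is_leaves[node_id]:
--         return 0
--     # Bottom-up DP: one reverse pass over the node arrays fills a height table
--     # (children point forward, so a node's children are computed before it).
--     n = len(is_leaves)
--     heights = [0] * n
--     for i in reversed(range(n)):
--         if not is_leaves[i]:
--             hl = heights[children_left[i]] if children_left[i] >= 0 else 0
--             hr = heights[children_right[i]] if children_right[i] >= 0 else 0
--             heights[i] = max(hl, hr) + 1
--     if node_id != 0:
--         return heights[node_id]
--     hl = heights[children_left[0]] if children_left[0] >= 0 else 0
--     hr = heights[children_right[0]] if children_right[0] >= 0 else 0
--     return hr - hl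
-- ===== Notes on version B (the rewrite author's own statement) =====
-- stated objective: alternative
-- what changed: Replaces the top-down recursion with an iterative bottom-up pass that fills a height table over the node arrays (children point forward) and then does A's root/leaf dispatch from the table; Pre_ keeps the leaf shortcut for any valid index and otherwise requires well-formed forward-pointing tree arrays, excluding non-leaf starts over malformed arrays where A wraps negative indices, depends only on reachable entries, raises, or recurses forever.
-- outside the precondition, e.g. on get_balancing(0, [1, -1, 5], [-1, -1, -1], [False, True, False]): A returns 0, B raises IndexError; on get_balancing(-1, [-1, -1], [-1, -1], [False, False]): A returns 1, B returns 1
import Mathlib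
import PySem

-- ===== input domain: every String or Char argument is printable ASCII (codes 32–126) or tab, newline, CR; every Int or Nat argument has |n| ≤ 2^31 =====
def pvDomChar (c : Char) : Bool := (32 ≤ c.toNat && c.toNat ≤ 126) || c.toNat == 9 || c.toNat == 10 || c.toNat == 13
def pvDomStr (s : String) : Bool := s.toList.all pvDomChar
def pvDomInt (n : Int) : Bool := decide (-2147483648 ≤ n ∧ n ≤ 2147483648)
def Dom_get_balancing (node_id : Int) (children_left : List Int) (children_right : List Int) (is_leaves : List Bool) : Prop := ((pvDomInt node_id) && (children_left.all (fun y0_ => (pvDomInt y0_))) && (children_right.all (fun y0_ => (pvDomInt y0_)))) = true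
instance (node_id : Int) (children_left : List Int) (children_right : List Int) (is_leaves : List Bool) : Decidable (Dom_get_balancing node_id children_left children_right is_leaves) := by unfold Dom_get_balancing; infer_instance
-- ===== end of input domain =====

-- B replaces A's top-down recursion by one iterative bottom-up pass filling a height
-- table over the node arrays (objective: alternative; same asymptotic cost on trees).

-- ===== PORT A =====
-- A's recursion, with a fuel guard that only makes the same computation total:
-- under Pre_ the child index strictly increases at every call, so fuel n+1 never runs out.
def pvGoA (fuel : Nat) (node_id : Int) (children_left : List Int) (children_right : List Int) (is_leaves : List Bool) : Int :=
  match fuel with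
  | 0 => 0
  | f + 1 =>
    if PySem.List.pyGetD is_leaves node_id false then 0
    else
      let hl := if 0 ≤ PySem.List.pyGetD children_left node_id 0 then
          pvGoA f (PySem.List.pyGetD children_left node_id 0) children_left children_right is_leaves else 0
      let hr := if 0 ≤ PySem.List.pyGetD children_right node_id 0 then
          pvGoA f (PySem.List.pyGetD children_right node_id 0) children_left children_right is_leaves else 0
      let h := max hr hl + 1
      if node_id ≠ 0 then h else hr - hl

def get_balancing (node_id : Int) (children_left : List Int) (children_right : List Int) (is_leaves : List Bool) : Int :=
  pvGoA (is_leaves.length + 1) node_id children_left children_right is_leaves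

-- ===== PORT B =====
-- loop body of B's 'for i in reversed(range(n))'
def pvStepB (children_left : List Int) (children_right : List Int) (is_leaves : List Bool) (hs : List Int) (i : Nat) : List Int :=
  if is_leaves.getD i false then hs
  else
    let hl := if 0 ≤ children_left.getD i 0 then hs.getD (children_left.getD i 0).toNat 0 else 0
    let hr := if 0 ≤ children_right.getD i 0 then hs.getD (children_right.getD i 0).toNat 0 else 0
    hs.set i (max hl hr + 1)

def get_balancing_alt (node_id : Int) (children_left : List Int) (children_right : List Int) (is_leaves : List Bool) : Int :=
  if PySem.List.pyGetD is_leaves node_id false then 0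
  else
  let n := is_leaves.length
  let heights := ((List.range n).reverse).foldl (pvStepB children_left children_right is_leaves) (List.replicate n 0)
  if node_id ≠ 0 then heights.getD node_id.toNat 0
  else
    let hl := if 0 ≤ children_left.getD 0 0 then heights.getD (children_left.getD 0 0).toNat 0 else 0
    let hr := if 0 ≤ children_right.getD 0 0 then heights.getD (children_right.getD 0 0).toNat 0 else 0
    hr - hl

-- ===== PRECONDITION & SPEC =====
-- Pre_ admits any valid starting index whose node is a leaf (both programs return 0 at once),
-- and otherwise requires well-formed forward-pointing tree arrays (equal lengths, node_id in
-- range, every child index negative or strictly larger than its parent and in range): outside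
-- that, a non-leaf start lets A wrap negative indices, raise IndexError/RecursionError, or
-- return a value depending only on reachable entries which B's full-table pass cannot reproduce.
def Pre_get_balancing (node_id : Int) (children_left : List Int) (children_right : List Int) (is_leaves : List Bool) : Prop :=
  (PySem.Raise.InRange is_leaves.length node_id ∧ PySem.List.pyGetD is_leaves node_id false = true) ∨
  (children_left.length = is_leaves.length ∧
  children_right.length = is_leaves.length ∧
  0 ≤ node_id ∧ node_id < (is_leaves.length : Int) ∧
  (∀ i, i < is_leaves.length →
    (children_left.getD i 0 < (is_leaves.length : Int) ∧ (0 ≤ children_left.getD i 0 → (i : Int) < children_left.getD i 0)) ∧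
    (children_right.getD i 0 < (is_leaves.length : Int) ∧ (0 ≤ children_right.getD i 0 → (i : Int) < children_right.getD i 0))))

instance (node_id : Int) (children_left : List Int) (children_right : List Int) (is_leaves : List Bool) : Decidable (Pre_get_balancing node_id children_left children_right is_leaves) := by unfold Pre_get_balancing; infer_instance

def pvWitness_get_balancing : Int × List Int × List Int × List Bool := (0, [1, -1, -1], [2, -1, -1], [false, true, true])

def Spec_get_balancing (node_id : Int) (children_left : List Int) (children_right : List Int) (is_leaves : List Bool) (out : Int) : Prop := out = get_balancing_alt node_id children_left children_right is_leaves
instance (node_id : Int) (children_left : List Int) (children_right : List Int) (is_leaves : List Bool) (out : Int) : Decidable (Spec_get_balancing node_id children_left children_right is_leaves out) := by unfold Spec_get_balancing; infer_instance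

-- ===== CLAIM (what is proved, stated in full; the proofs are below) =====
def Claim_equal_get_balancing : Prop := ∀ (node_id : Int) (children_left : List Int) (children_right : List Int) (is_leaves : List Bool), Dom_get_balancing node_id children_left children_right is_leaves → Pre_get_balancing node_id children_left children_right is_leaves → Spec_get_balancing node_id children_left children_right is_leaves (get_balancing node_id children_left children_right is_leaves)

-- ===== LEMMAS AND PROOFS =====

-- well-formedness of the child arrays (the ∀ part of Pre_)
def pvWF (children_left : List Int) (children_right : List Int) (is_leaves : List Bool) : Prop :=
  ∀ i, i < is_leaves.length →
    (children_left.getD i 0 < (is_leaves.length : Int) ∧ (0 ≤ children_left.getD i 0 → (i : Int) < children_left.getD i 0)) ∧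
    (children_right.getD i 0 < (is_leaves.length : Int) ∧ (0 ≤ children_right.getD i 0 → (i : Int) < children_right.getD i 0))

-- one-step unfolding of A's recursion, kept in the exact surface form (definitional)
lemma pvGoA_succ (f : Nat) (nid : Int) (cl cr : List Int) (lv : List Bool) :
    pvGoA (f + 1) nid cl cr lv =
      if PySem.List.pyGetD lv nid false then 0
      else if nid ≠ 0 then
        max (if 0 ≤ PySem.List.pyGetD cr nid 0 then pvGoA f (PySem.List.pyGetD cr nid 0) cl cr lv else 0)
            (if 0 ≤ PySem.List.pyGetD cl nid 0 then pvGoA f (PySem.List.pyGetD cl nid 0) cl cr lv else 0) + 1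
      else (if 0 ≤ PySem.List.pyGetD cr nid 0 then pvGoA f (PySem.List.pyGetD cr nid 0) cl cr lv else 0) -
           (if 0 ≤ PySem.List.pyGetD cl nid 0 then pvGoA f (PySem.List.pyGetD cl nid 0) cl cr lv else 0) := rfl

-- at a Nat-cast index the Python get is the plain getD (PySem.List.pyGetD_natCast, packaged
-- for a single rw of all three arrays at a step of A's recursion)
lemma pvGoA_succ_nat (f : Nat) (j : Nat) (cl cr : List Int) (lv : List Bool) :
    pvGoA (f + 1) (j : Int) cl cr lv =
      if lv.getD j false then 0
      else if (j : Int) ≠ 0 then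
        max (if 0 ≤ cr.getD j 0 then pvGoA f (cr.getD j 0) cl cr lv else 0)
            (if 0 ≤ cl.getD j 0 then pvGoA f (cl.getD j 0) cl cr lv else 0) + 1
      else (if 0 ≤ cr.getD j 0 then pvGoA f (cr.getD j 0) cl cr lv else 0) -
           (if 0 ≤ cl.getD j 0 then pvGoA f (cl.getD j 0) cl cr lv else 0) := by
  rw [pvGoA_succ, PySem.List.pyGetD_natCast, PySem.List.pyGetD_natCast, PySem.List.pyGetD_natCast]

-- A's recursion is fuel-insensitive once the fuel covers the remaining index range
lemma pvGoA_fuel (cl cr : List Int) (lv : List Bool) (hwf : pvWF cl cr lv) :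
    ∀ k f1 f2 (j : Nat), j < lv.length → lv.length - j ≤ k → lv.length - j ≤ f1 → lv.length - j ≤ f2 →
      pvGoA f1 (j : Int) cl cr lv = pvGoA f2 (j : Int) cl cr lv := by
  intro k
  induction k with
  | zero => intro f1 f2 j hj hk _ _; omega
  | succ k ih =>
    intro f1 f2 j hj hk h1 h2
    obtain ⟨f1', rfl⟩ : ∃ m, f1 = m + 1 := ⟨f1 - 1, by omega⟩
    obtain ⟨f2', rfl⟩ : ∃ m, f2 = m + 1 := ⟨f2 - 1, by omega⟩
    obtain ⟨⟨hl1, hl2⟩, ⟨hr1, hr2⟩⟩ := hwf j hj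
    rw [pvGoA_succ_nat, pvGoA_succ_nat]
    by_cases hleaf : lv.getD j false
    · rw [if_pos hleaf, if_pos hleaf]
    · rw [if_neg hleaf, if_neg hleaf]
      have hcl : (if 0 ≤ cl.getD j 0 then pvGoA f1' (cl.getD j 0) cl cr lv else 0) =
          (if 0 ≤ cl.getD j 0 then pvGoA f2' (cl.getD j 0) cl cr lv else 0) := by
        by_cases hc : 0 ≤ cl.getD j 0
        · rw [if_pos hc, if_pos hc]
          have hc2 := hl2 hc
          have hcast : cl.getD j 0 = ((cl.getD j 0).toNat : Int) := by omega
          rw [hcast]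
          exact ih f1' f2' (cl.getD j 0).toNat (by omega) (by omega) (by omega) (by omega)
        · rw [if_neg hc, if_neg hc]
      have hcr : (if 0 ≤ cr.getD j 0 then pvGoA f1' (cr.getD j 0) cl cr lv else 0) =
          (if 0 ≤ cr.getD j 0 then pvGoA f2' (cr.getD j 0) cl cr lv else 0) := by
        by_cases hc : 0 ≤ cr.getD j 0
        · rw [if_pos hc, if_pos hc]
          have hc2 := hr2 hc
          have hcast : cr.getD j 0 = ((cr.getD j 0).toNat : Int) := by omega
          rw [hcast]
          exact ih f1' f2' (cr.getD j 0).toNat (by omega) (by omega) (by omega) (by omega)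
        · rw [if_neg hc, if_neg hc]
      rw [hcl, hcr]

-- the loop invariant: after processing indices m-1,…,0 the table equals A's heights on [max 1 m, n)
lemma pvLoopB (cl cr : List Int) (lv : List Bool) (hwf : pvWF cl cr lv) :
    ∀ m, m ≤ lv.length → ∀ hs : List Int, hs.length = lv.length →
      (∀ j, 1 ≤ j → m ≤ j → j < lv.length → hs.getD j 0 = pvGoA (lv.length + 1) (j : Int) cl cr lv) →
      (∀ j, j < m → hs.getD j 0 = 0) →
      (((List.range m).reverse).foldl (pvStepB cl cr lv) hs).length = lv.length ∧
      ∀ j, 1 ≤ j → j < lv.length →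
        (((List.range m).reverse).foldl (pvStepB cl cr lv) hs).getD j 0 = pvGoA (lv.length + 1) (j : Int) cl cr lv := by
  intro m
  induction m with
  | zero =>
    intro _ hs hlen hinv _
    simp only [List.range_zero, List.reverse_nil, List.foldl_nil]
    exact ⟨hlen, fun j h1 hn => hinv j h1 (Nat.zero_le _) hn⟩
  | succ m ih =>
    intro hm hs hlen hinv hzero
    rw [List.range_succ, List.reverse_append, List.reverse_singleton]
    simp only [List.singleton_append, List.foldl_cons]
    set hs' := pvStepB cl cr lv hs m with hhs'
    have hlen' : hs'.length = lv.length := by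
      rw [hhs']; unfold pvStepB
      split
      · exact hlen
      · simp [hlen]
    have huntouched : ∀ j, j ≠ m → hs'.getD j 0 = hs.getD j 0 := by
      intro j hj
      rw [hhs']; unfold pvStepB
      split
      · rfl
      · rw [List.getD, List.getD, List.getElem?_set_ne (by omega)]
        rfl
    apply ih (by omega) hs' hlen'
    · -- invariant extended down to index m
      intro j h1 hmj hjn
      by_cases hjm : j = m
      · subst hjm
        obtain ⟨⟨hl1, hl2⟩, ⟨hr1, hr2⟩⟩ := hwf j hjn
        have hj0 : (j : Int) ≠ 0 := by omega
        rw [hhs']; unfold pvStepB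
        by_cases hleaf : lv.getD j false
        · -- leaf: the table entry is still 0 and A returns 0
          rw [if_pos hleaf, hzero j (by omega), pvGoA_succ_nat, if_pos hleaf]
        · rw [if_neg hleaf]
          have hset : (hs.set j (max (if 0 ≤ cl.getD j 0 then hs.getD (cl.getD j 0).toNat 0 else 0)
              (if 0 ≤ cr.getD j 0 then hs.getD (cr.getD j 0).toNat 0 else 0) + 1)).getD j 0 =
              max (if 0 ≤ cl.getD j 0 then hs.getD (cl.getD j 0).toNat 0 else 0)
                (if 0 ≤ cr.getD j 0 then hs.getD (cr.getD j 0).toNat 0 else 0) + 1 := by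
            rw [List.getD, List.getElem?_set_self (by omega)]
            rfl
          rw [hset, pvGoA_succ_nat, if_neg hleaf, if_pos hj0]
          have hleft : (if 0 ≤ cl.getD j 0 then hs.getD (cl.getD j 0).toNat 0 else 0) =
              (if 0 ≤ cl.getD j 0 then pvGoA (lv.length) (cl.getD j 0) cl cr lv else 0) := by
            by_cases hc : 0 ≤ cl.getD j 0
            · rw [if_pos hc, if_pos hc]
              have hc2 := hl2 hc
              have hcc : cl.getD j 0 = (((cl.getD j 0).toNat : Nat) : Int) := by omega
              rw [hinv (cl.getD j 0).toNat (by omega) (by omega) (by omega), hcc]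
              exact pvGoA_fuel cl cr lv hwf (lv.length + 1) _ _ _ (by omega) (by omega) (by omega) (by omega)
            · rw [if_neg hc, if_neg hc]
          have hright : (if 0 ≤ cr.getD j 0 then hs.getD (cr.getD j 0).toNat 0 else 0) =
              (if 0 ≤ cr.getD j 0 then pvGoA (lv.length) (cr.getD j 0) cl cr lv else 0) := by
            by_cases hc : 0 ≤ cr.getD j 0
            · rw [if_pos hc, if_pos hc]
              have hc2 := hr2 hc
              have hcc : cr.getD j 0 = (((cr.getD j 0).toNat : Nat) : Int) := by omega
              rw [hinv (cr.getD j 0).toNat (by omega) (by omega) (by omega), hcc]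
              exact pvGoA_fuel cl cr lv hwf (lv.length + 1) _ _ _ (by omega) (by omega) (by omega) (by omega)
            · rw [if_neg hc, if_neg hc]
          rw [hleft, hright, max_comm]
      · rw [huntouched j hjm]
        exact hinv j h1 (by omega) hjn
    · -- entries below m are still 0
      intro j hjm
      rw [huntouched j (by omega)]
      exact hzero j (by omega)

-- ===== VERDICT (by name: the statement is the Claim_ definition above) =====
theorem get_balancing_spec : Claim_equal_get_balancing := by
  intro node_id cl cr lv _ hpre
  unfold Spec_get_balancing get_balancing get_balancing_alt
  rcases hpre with ⟨_, hleafcut⟩ | ⟨hlcl, hlcr, hn0, hn1, hwf⟩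
  · -- leaf shortcut: both programs return 0 immediately
    rw [if_pos hleafcut, pvGoA_succ, if_pos hleafcut]
  · obtain ⟨nid, rfl⟩ : ∃ m : Nat, node_id = (m : Int) := ⟨node_id.toNat, by omega⟩
    have hnid : nid < lv.length := by omega
    have hjt : ((nid : Int)).toNat = nid := Int.toNat_natCast nid
    have hlv : PySem.List.pyGetD lv (nid : Int) false = lv.getD nid false := PySem.List.pyGetD_natCast ..
    rw [hlv, hjt]
    by_cases hleaf : lv.getD nid false
    · rw [if_pos hleaf, pvGoA_succ_nat, if_pos hleaf]
    · rw [if_neg hleaf, pvGoA_succ_nat, if_neg hleaf]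
      dsimp only
      obtain ⟨hlen, hinv⟩ := pvLoopB cl cr lv hwf lv.length (le_refl _) (List.replicate lv.length 0)
        (by simp) (by omega) (by intro j hj; simp)
      set heights := ((List.range lv.length).reverse).foldl (pvStepB cl cr lv) (List.replicate lv.length 0) with hh
      by_cases hz : (nid : Int) = 0
      · -- root: the balance hr - hl, children read from the table
        have hnz : nid = 0 := by omega
        subst hnz
        obtain ⟨⟨hl1, hl2⟩, ⟨hr1, hr2⟩⟩ := hwf 0 hnid
        have hleft : (if 0 ≤ cl.getD 0 0 then heights.getD (cl.getD 0 0).toNat 0 else 0) =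
            (if 0 ≤ cl.getD 0 0 then pvGoA (lv.length) (cl.getD 0 0) cl cr lv else 0) := by
          by_cases hc : 0 ≤ cl.getD 0 0
          · rw [if_pos hc, if_pos hc]
            have hc2 := hl2 hc
            have hcc : cl.getD 0 0 = (((cl.getD 0 0).toNat : Nat) : Int) := by omega
            rw [hinv (cl.getD 0 0).toNat (by omega) (by omega), hcc]
            exact pvGoA_fuel cl cr lv hwf (lv.length + 1) _ _ _ (by omega) (by omega) (by omega) (by omega)
          · rw [if_neg hc, if_neg hc]
        have hright : (if 0 ≤ cr.getD 0 0 then heights.getD (cr.getD 0 0).toNat 0 else 0) =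
            (if 0 ≤ cr.getD 0 0 then pvGoA (lv.length) (cr.getD 0 0) cl cr lv else 0) := by
          by_cases hc : 0 ≤ cr.getD 0 0
          · rw [if_pos hc, if_pos hc]
            have hc2 := hr2 hc
            have hcc : cr.getD 0 0 = (((cr.getD 0 0).toNat : Nat) : Int) := by omega
            rw [hinv (cr.getD 0 0).toNat (by omega) (by omega), hcc]
            exact pvGoA_fuel cl cr lv hwf (lv.length + 1) _ _ _ (by omega) (by omega) (by omega) (by omega)
          · rw [if_neg hc, if_neg hc]
        rw [hleft, hright]
        simp
      · -- inner node: A's value is the table entry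
        rw [if_pos hz, if_pos hz, hinv nid (by omega) hnid, pvGoA_succ_nat, if_neg hleaf, if_pos hz]
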